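-- pv_equiv track=rewrite | github.com/murfel/paradigms2016 | para-task-01/string_task.py | not_bad
-- ===== SOURCE A (Python) =====
-- def not_bad(s):
--
--     # Alternatively:
--     #not_ind = s.find('not')
--     #bad_ind = s.find('bad')
--     #...
--
--     # More alternatively:
--     #import re
--     ## The regex should be like '([\S\s]*)not[\s\S]*bad([\s\S]*)'
--     ## (see regexr.com/3e6go) Any suggestions?
--     #m = re.search('', s)
--     #if m:
--     #    s = m.group(0) + 'good' + m.group(1)
--     #return s
--
--     found_not = False
--     found_bad = False
--     for i in range(len(s) - 2):
--         if not found_not: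
--             if s[i:i + 3] == 'not':
--                 found_not = True
--                 not_ind = i
--         if not found_bad:
--             if s[i:i + 3] == 'bad':
--                 found_bad = True
--                 bad_ind = i
--
--     if found_not and found_bad and (not_ind < bad_ind):
--         s = s[:not_ind] + 'good' + s[bad_ind + 3:]
--
--     return s
-- ===== SOURCE B (Python) =====
-- def not_bad(s):
--     left, sep, right = s.partition('bad')
--     if sep:
--         head, mid, _tail = left.partition('not')
--         if mid:
--             return head + 'good' + right
--     return s
-- ===== Notes on version B (the rewrite author's own statement) =====
-- stated objective: simpler
-- what changed: A's interleaved position-by-position scan tracking found-flags and indices is replaced by two nested str.partition splits (split at the first 'bad', then split the left piece at the first 'not') that rebuild the string from the pieces with no index arithmetic or comparisons.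
import Mathlib
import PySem

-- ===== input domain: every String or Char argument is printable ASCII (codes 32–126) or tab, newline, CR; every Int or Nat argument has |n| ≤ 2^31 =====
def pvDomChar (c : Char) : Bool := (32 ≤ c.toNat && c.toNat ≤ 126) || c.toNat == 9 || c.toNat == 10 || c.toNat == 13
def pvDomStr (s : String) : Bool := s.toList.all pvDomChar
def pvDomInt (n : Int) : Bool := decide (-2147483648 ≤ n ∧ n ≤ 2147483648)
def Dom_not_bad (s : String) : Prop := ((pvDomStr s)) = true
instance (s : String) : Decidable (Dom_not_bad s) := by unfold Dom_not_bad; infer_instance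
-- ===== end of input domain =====

-- B replaces A's interleaved index-tracking scan by two nested string partitions
-- (split at the first 'bad', then split the left piece at the first 'not') with no
-- index arithmetic or comparisons; objective: simpler.

-- ===== PORT A =====
-- one loop iteration of A: update each (found, ind) pair if its pattern starts at i
def notBadStep (sl : List Char) (st : (Bool × Int) × (Bool × Int)) (i : Int) :
    (Bool × Int) × (Bool × Int) :=
  let st1 := if st.1.1 = false then
      (if PySem.List.slice sl (some i) (some (i + 3)) = "not".toList then (true, i) else st.1)
    else st.1
  let st2 := if st.2.1 = false then
      (if PySem.List.slice sl (some i) (some (i + 3)) = "bad".toList then (true, i) else st.2)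
    else st.2
  (st1, st2)

def not_bad (s : String) : String :=
  let sl := s.toList
  let st := (PySem.List.pyRange 0 (PySem.Str.len s - 2) 1).foldl (notBadStep sl)
    ((false, 0), (false, 0))
  if st.1.1 = true ∧ st.2.1 = true ∧ st.1.2 < st.2.2 then
    String.ofList (PySem.List.slice sl none (some st.1.2) ++ "good".toList ++
      PySem.List.slice sl (some (st.2.2 + 3)) none)
  else s

-- ===== PORT B =====
-- hand port of Python's str.partition (PySem has no partition primitive): exact —
-- (s, '', '') when sep is absent, else (before first sep, sep, after first sep)
def pyPartition (s pat : List Char) : List Char × List Char × List Char :=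
  let i := PySem.Chars.find s pat
  if i < 0 then (s, [], []) else (s.take i.toNat, pat, s.drop (i.toNat + pat.length))

def not_bad_alt (s : String) : String :=
  let p := pyPartition s.toList "bad".toList
  if p.2.1 ≠ [] then
    let q := pyPartition p.1 "not".toList
    if q.2.1 ≠ [] then String.ofList (q.1 ++ "good".toList ++ p.2.2)
    else s
  else s

-- ===== PRECONDITION & SPEC =====
def Spec_not_bad (s : String) (out : String) : Prop := out = not_bad_alt s
instance (s : String) (out : String) : Decidable (Spec_not_bad s out) := by unfold Spec_not_bad; infer_instance

-- ===== CLAIM (what is proved, stated in full; the proofs are below) =====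
def Claim_equal_not_bad : Prop := ∀ (s : String), Dom_not_bad s → Spec_not_bad s (not_bad s)

-- ===== LEMMAS AND PROOFS =====

-- single-pattern step: what notBadStep does on each component
def step1 (sl pat : List Char) (st : Bool × Int) (i : Int) : Bool × Int :=
  if st.1 = false then
    (if PySem.List.slice sl (some i) (some (i + 3)) = pat then (true, i) else st)
  else st

theorem foldl_notBadStep (sl : List Char) (l : List Int) (p q : Bool × Int) :
    l.foldl (notBadStep sl) (p, q) =
      (l.foldl (step1 sl "not".toList) p, l.foldl (step1 sl "bad".toList) q) := by
  induction l generalizing p q with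
  | nil => rfl
  | cons x xs ih => exact ih _ _

theorem slice3_eq_iff (sl pat : List Char) (hpat : pat.length = 3) (j : Nat) :
    (PySem.List.slice sl (some (j : Int)) (some ((j : Int) + 3)) = pat) ↔ pat <+: sl.drop j := by
  have h3 : ((j : Int) + 3) = ((j + 3 : Nat) : Int) := by push_cast; ring
  rw [h3, PySem.List.slice_natCast, List.prefix_iff_eq_take, hpat]
  have hj : j + 3 - j = 3 := by omega
  rw [hj]
  exact eq_comm

theorem foldl_step1_eq (sl pat : List Char) (hpat : pat.length = 3) (k : Nat) :
    (PySem.List.pyRange 0 (k : Int) 1).foldl (step1 sl pat) (false, 0) =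
      if 0 ≤ PySem.Chars.find sl pat ∧ PySem.Chars.find sl pat < (k : Int)
      then (true, PySem.Chars.find sl pat) else (false, 0) := by
  induction k with
  | zero =>
    rw [PySem.List.pyRange_one_eq_nil (by norm_num)]
    rw [if_neg (by omega)]
    rfl
  | succ k ih =>
    have hcast : ((k + 1 : Nat) : Int) = (k : Int) + 1 := by push_cast; ring
    rw [hcast, PySem.List.pyRange_one_succ_right (by positivity), List.foldl_append]
    rw [ih]
    set F := PySem.Chars.find sl pat with hF
    by_cases h1 : 0 ≤ F ∧ F < (k : Int)
    · rw [if_pos h1, if_pos ⟨h1.1, by omega⟩]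
      rfl
    · rw [if_neg h1]
      show step1 sl pat (false, 0) (k : Int) = _
      by_cases h2 : pat <+: sl.drop k
      · have hin : 0 ≤ F := by
          rw [hF, PySem.Chars.find_nonneg_iff, ← PySem.Chars.isIn_iff_infix,
            ← PySem.Chars.exists_prefix_drop_iff_isIn]
          exact ⟨k, h2⟩
        have hspec := PySem.Chars.find_spec (s := sl) (sub := pat) (by rw [← hF]; exact hin)
        have hFk : F = (k : Int) := by
          by_contra hne
          have hkF : k < F.toNat := by omega
          exact hspec.2 k hkF h2
        rw [step1, if_pos rfl, if_pos ((slice3_eq_iff sl pat hpat k).mpr h2),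
          if_pos ⟨hin, by omega⟩, hFk]
      · rw [step1, if_pos rfl, if_neg (by rw [slice3_eq_iff sl pat hpat k]; exact h2)]
        rw [if_neg]
        intro ⟨ha, hb⟩
        have hFk : F = (k : Int) := by omega
        have hspec := PySem.Chars.find_spec (s := sl) (sub := pat) (by rw [← hF]; exact ha)
        rw [← hF, hFk] at hspec
        exact h2 (by simpa using hspec.1)

theorem find_lt_bound (sl pat : List Char) (hpat : pat.length = 3)
    (h : 0 ≤ PySem.Chars.find sl pat) :
    PySem.Chars.find sl pat < ((sl.length - 2 : Nat) : Int) := by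
  have hspec := (PySem.Chars.find_spec (s := sl) (sub := pat) h).1
  have hlen := hspec.length_le
  rw [hpat, List.length_drop] at hlen
  have ht := Int.toNat_of_nonneg h
  omega

-- an occurrence of a 3-pattern inside a prefix take b, moved back and forth
theorem prefix_drop_take_iff (sl pat : List Char) (hpat : pat.length = 3) (b j : Nat) :
    pat <+: (sl.take b).drop j ↔ (pat <+: sl.drop j ∧ j + 3 ≤ b) := by
  rw [List.drop_take, List.prefix_take_iff, hpat]
  constructor <;> rintro ⟨h1, h2⟩ <;> exact ⟨h1, by omega⟩

-- reading a single character out of a prefix-of-drop occurrence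
theorem getElem?_of_prefix_drop (sl pat : List Char) (j k : Nat)
    (h : pat <+: sl.drop j) (hk : k < pat.length) :
    sl[j + k]? = pat[k]? := by
  rw [← List.getElem?_drop]
  obtain ⟨t, ht⟩ := h
  rw [← ht, List.getElem?_append_left hk]

-- no straddle: an occurrence of 'not' strictly before the first 'bad' ends before it
theorem not_before_bad (sl : List Char) (b j : Nat)
    (hbad : "bad".toList <+: sl.drop b)
    (hnot : "not".toList <+: sl.drop j) (hj : j < b) : j + 3 ≤ b := by
  by_contra h
  have hb0 : sl[b]? = some 'b' := by
    have := getElem?_of_prefix_drop sl "bad".toList b 0 hbad (by decide)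
    simpa using this
  rcases Nat.lt_or_ge (j + 1) b with h1 | h1
  · -- j + 2 = b
    have hbj : b = j + 2 := by omega
    have := getElem?_of_prefix_drop sl "not".toList j 2 hnot (by decide)
    rw [hbj] at hb0
    simp [this] at hb0
  · -- j + 1 = b
    have hbj : b = j + 1 := by omega
    have := getElem?_of_prefix_drop sl "not".toList j 1 hnot (by decide)
    rw [hbj] at hb0
    simp [this] at hb0

-- relate find 'not' on the left part of the 'bad'-partition to find 'not' on all of sl
theorem find_not_take (sl : List Char) (hb : 0 ≤ PySem.Chars.find sl "bad".toList) :
    PySem.Chars.find ((sl.take (PySem.Chars.find sl "bad".toList).toNat)) "not".toList =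
      if 0 ≤ PySem.Chars.find sl "not".toList ∧
         PySem.Chars.find sl "not".toList < PySem.Chars.find sl "bad".toList
      then PySem.Chars.find sl "not".toList else -1 := by
  set Fb := PySem.Chars.find sl "bad".toList with hFb
  set Fn := PySem.Chars.find sl "not".toList with hFn
  set b := Fb.toNat with hbdef
  have hbad := (PySem.Chars.find_spec (s := sl) (sub := "bad".toList) hb).1
  have hbv : Fb = (b : Int) := by omega
  -- occurrences in the take are exactly occurrences in sl strictly before b
  have hocc : ∀ j, "not".toList <+: (sl.take b).drop j ↔
      ("not".toList <+: sl.drop j ∧ j < b) := by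
    intro j
    rw [prefix_drop_take_iff sl "not".toList (by decide) b j]
    constructor
    · rintro ⟨h1, h2⟩; exact ⟨h1, by omega⟩
    · rintro ⟨h1, h2⟩; exact ⟨h1, not_before_bad sl b j hbad h1 h2⟩
  by_cases h1 : 0 ≤ Fn ∧ Fn < Fb
  · rw [if_pos h1]
    have hnspec := PySem.Chars.find_spec (s := sl) (sub := "not".toList) h1.1
    set n := Fn.toNat with hndef
    have hnv : Fn = (n : Int) := by omega
    have hnb : n < b := by omega
    have hoccn : "not".toList <+: (sl.take b).drop n := (hocc n).mpr ⟨hnspec.1, hnb⟩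
    have hT0 : 0 ≤ PySem.Chars.find (sl.take b) "not".toList := by
      rw [PySem.Chars.find_nonneg_iff, ← PySem.Chars.isIn_iff_infix,
        ← PySem.Chars.exists_prefix_drop_iff_isIn]
      exact ⟨n, hoccn⟩
    have hTspec := PySem.Chars.find_spec (s := sl.take b) (sub := "not".toList) hT0
    set T := PySem.Chars.find (sl.take b) "not".toList with hT
    have hle1 : T.toNat ≤ n := by
      by_contra hc
      exact hTspec.2 n (by omega) hoccn
    have hle2 : n ≤ T.toNat := by
      by_contra hc
      exact hnspec.2 T.toNat (by omega) ((hocc T.toNat).mp hTspec.1).1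
    omega
  · rw [if_neg h1]
    rw [PySem.Chars.find_eq_neg_one_iff, ← PySem.Chars.isIn_eq_false_iff]
    have : ∀ j, ¬ "not".toList <+: (sl.take b).drop j := by
      intro j hj
      rw [hocc j] at hj
      have h0 : 0 ≤ Fn := by
        rw [hFn, PySem.Chars.find_nonneg_iff, ← PySem.Chars.isIn_iff_infix,
          ← PySem.Chars.exists_prefix_drop_iff_isIn]
        exact ⟨j, hj.1⟩
      have hnspec := PySem.Chars.find_spec (s := sl) (sub := "not".toList) h0
      have hle : Fn.toNat ≤ j := by
        by_contra hc
        exact hnspec.2 j (by omega) hj.1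
      exact h1 ⟨h0, by omega⟩
    by_contra hc
    rw [Bool.not_eq_false, ← PySem.Chars.exists_prefix_drop_iff_isIn] at hc
    obtain ⟨j, hj⟩ := hc
    exact this j hj

-- what B computes, phrased through the first-occurrence indices of the two patterns
theorem alt_characterization (s : String) :
    not_bad_alt s =
      if 0 ≤ PySem.Chars.find s.toList "bad".toList ∧
         0 ≤ PySem.Chars.find s.toList "not".toList ∧
         PySem.Chars.find s.toList "not".toList < PySem.Chars.find s.toList "bad".toList
      then String.ofList
          (s.toList.take (PySem.Chars.find s.toList "not".toList).toNat ++ "good".toList ++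
            s.toList.drop ((PySem.Chars.find s.toList "bad".toList).toNat + 3))
      else s := by
  unfold not_bad_alt pyPartition
  set sl := s.toList with hsl
  set Fn := PySem.Chars.find sl "not".toList with hFn
  set Fb := PySem.Chars.find sl "bad".toList with hFb
  by_cases hb : Fb < 0
  · simp only [if_pos hb]
    rw [if_neg (by simp), if_neg (by omega)]
  · simp only [if_neg hb]
    rw [if_pos (by simp)]
    rw [find_not_take sl (by omega), ← hFn, ← hFb]
    by_cases hn : 0 ≤ Fn ∧ Fn < Fb
    · have hnlt : ¬ Fn < 0 := by omega
      have hcond : 0 ≤ Fb ∧ 0 ≤ Fn ∧ Fn < Fb := ⟨by omega, hn⟩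
      have hmin : min Fn.toNat Fb.toNat = Fn.toNat := by omega
      rw [if_pos hn]
      simp [if_neg hnlt, if_pos hcond, List.take_take, hmin]
    · have hcond : ¬ (0 ≤ Fb ∧ 0 ≤ Fn ∧ Fn < Fb) := fun h => hn ⟨h.2.1, h.2.2⟩
      rw [if_neg hn]
      simp [if_neg hcond]

-- ===== VERDICT (by name: the statement is the Claim_ definition above) =====
theorem not_bad_spec : Claim_equal_not_bad := by
  intro s _
  show not_bad s = not_bad_alt s
  unfold not_bad
  rw [alt_characterization]
  have hrange : PySem.List.pyRange 0 (PySem.Str.len s - 2) 1 =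
      PySem.List.pyRange 0 ((s.toList.length - 2 : Nat) : Int) 1 := by
    rw [PySem.Str.len_eq]
    by_cases h : 2 ≤ s.toList.length
    · congr 1; omega
    · rw [PySem.List.pyRange_one_eq_nil (by omega), PySem.List.pyRange_one_eq_nil (by omega)]
  simp only [hrange, foldl_notBadStep,
    foldl_step1_eq s.toList "not".toList (by decide),
    foldl_step1_eq s.toList "bad".toList (by decide)]
  set sl := s.toList with hsl
  set B := ((sl.length - 2 : Nat) : Int) with hB
  set Fn := PySem.Chars.find sl "not".toList with hFn
  set Fb := PySem.Chars.find sl "bad".toList with hFb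
  have hnn : -1 ≤ Fn := PySem.Chars.neg_one_le_find _ _
  have hnb : -1 ≤ Fb := PySem.Chars.neg_one_le_find _ _
  by_cases h1 : 0 ≤ Fn ∧ Fn < B
  · by_cases h2 : 0 ≤ Fb ∧ Fb < B
    · rw [if_pos h1, if_pos h2]
      by_cases h3 : Fn < Fb
      · rw [if_pos ⟨rfl, rfl, h3⟩, if_pos ⟨h2.1, h1.1, h3⟩]
        rw [PySem.List.slice_to sl h1.1, PySem.List.slice_from sl (by omega)]
        have h4 : (Fb + 3).toNat = Fb.toNat + 3 := by omega
        rw [h4]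
      · rw [if_neg (fun h => h3 h.2.2), if_neg (fun h => h3 h.2.2)]
    · rw [if_pos h1, if_neg h2,
        if_neg (fun h => Bool.false_ne_true h.2.1),
        if_neg (fun h => h2 ⟨h.1, find_lt_bound sl "bad".toList (by decide) h.1⟩)]
  · rw [if_neg h1, if_neg (fun h => Bool.false_ne_true h.1),
      if_neg (fun h => h1 ⟨h.2.1, find_lt_bound sl "not".toList (by decide) h.2.1⟩)]
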